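-- pv_equiv track=rewrite | github.com/LucasPln/MarcoPython | PROJET_PIFE_10/FMP/FMP.py | toutesLesRepartitions
-- ===== SOURCE A (Python) =====
-- def toutesLesRepartitions(n):
--     listePossibilite = []
--     nb2 = n//2
--     reste = n - (2 * nb2)
--
--     if(reste == 0):
--         queDesDeux = []
--         for i in range(nb2):
--             queDesDeux.append(2)
--
--         listePossibilite.append(queDesDeux)
--
--     nb2 = nb2 - 1
--
--     while (nb2 >= 0):
--         nb3 = 1
--         somme = 2*nb2 + 3*nb3
--
--         while (somme <= n):
--             if (somme == n):
--                 possibilite = []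
--
--                 for i in range(nb3):
--                     possibilite.append(3)
--
--                 for i in range(nb2):
--                     possibilite.append(2)
--
--                 listePossibilite.append(possibilite)
--
--             nb3 += 1
--             somme = 2*nb2 + 3*nb3
--
--         nb2 = nb2 - 1
--
--     return listePossibilite
-- ===== SOURCE B (Python) =====
-- def toutesLesRepartitions(n):
--     resultats = []
--     if n % 2 == 0:
--         resultats.append([2] * (n // 2))
--     nb2 = n // 2 - 1
--     while nb2 >= 0:
--         reste = n - 2 * nb2
--         if reste % 3 == 0:
--             resultats.append([3] * (reste // 3) + [2] * nb2)
--         nb2 -= 1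
--     return resultats
-- ===== Notes on version B (the rewrite author's own statement) =====
-- stated objective: simpler
-- what changed: Replaces A's nested scan over counts of threes (and its per-partition element-appending loops) with a single descending loop over the count of twos using a direct modular test on the remainder and list repetition to build each partition.
import Mathlib
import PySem

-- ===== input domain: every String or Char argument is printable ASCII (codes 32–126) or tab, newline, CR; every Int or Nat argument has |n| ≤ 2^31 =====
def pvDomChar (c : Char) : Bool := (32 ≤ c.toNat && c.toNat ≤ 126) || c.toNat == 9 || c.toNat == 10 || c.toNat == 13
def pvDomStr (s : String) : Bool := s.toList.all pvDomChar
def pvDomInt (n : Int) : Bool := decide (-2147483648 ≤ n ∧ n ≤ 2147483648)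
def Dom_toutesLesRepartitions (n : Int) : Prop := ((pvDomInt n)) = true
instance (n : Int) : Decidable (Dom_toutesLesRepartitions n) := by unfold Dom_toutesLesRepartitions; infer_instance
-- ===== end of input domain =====

-- B replaces A's nested scan over counts of 3s with one descending loop over nb2 and a
-- direct modular test (objective: simpler); same return value for every int n.

-- ===== PORT A =====
-- inner 'while (somme <= n)' loop of A; the conditional append is inlined in the recursive call
def innerA (n nb2 : Int) (nb3 : Int) (acc : List (List Int)) : List (List Int) :=
  if h : 2*nb2 + 3*nb3 ≤ n then
    innerA n nb2 (nb3 + 1)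
      (if 2*nb2 + 3*nb3 = n then
        acc ++ [((PySem.List.pyRange 0 nb2 1).foldl (fun p _ => p ++ [2])
                  ((PySem.List.pyRange 0 nb3 1).foldl (fun p _ => p ++ [3]) []))]
      else acc)
  else acc
termination_by (n - (2*nb2 + 3*nb3) + 3).toNat
decreasing_by omega

-- outer 'while (nb2 >= 0)' loop of A
def outerA (n : Int) (nb2 : Int) (acc : List (List Int)) : List (List Int) :=
  if _h : nb2 ≥ 0 then
    outerA n (nb2 - 1) (innerA n nb2 1 acc)
  else acc
termination_by (nb2 + 1).toNat
decreasing_by omega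

def toutesLesRepartitions (n : Int) : List (List Int) :=
  let nb2 := PySem.Int.floordiv n 2
  let reste := n - 2 * nb2
  let listePossibilite : List (List Int) :=
    if reste = 0 then
      [] ++ [((PySem.List.pyRange 0 nb2 1).foldl (fun p _ => p ++ [2]) [])]
    else []
  outerA n (nb2 - 1) listePossibilite

-- ===== PORT B =====
-- the single 'while nb2 >= 0' loop of B; the conditional append is inlined in the recursive call
def loopB (n : Int) (nb2 : Int) (acc : List (List Int)) : List (List Int) :=
  if _h : nb2 ≥ 0 then
    loopB n (nb2 - 1)
      (if PySem.Int.mod (n - 2 * nb2) 3 = 0 then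
        acc ++ [PySem.List.pyRepeat [3] (PySem.Int.floordiv (n - 2 * nb2) 3) ++
                PySem.List.pyRepeat [2] nb2]
      else acc)
  else acc
termination_by (nb2 + 1).toNat
decreasing_by omega

def toutesLesRepartitions_alt (n : Int) : List (List Int) :=
  let resultats : List (List Int) :=
    if PySem.Int.mod n 2 = 0 then
      [] ++ [PySem.List.pyRepeat [2] (PySem.Int.floordiv n 2)]
    else []
  loopB n (PySem.Int.floordiv n 2 - 1) resultats

-- ===== PRECONDITION & SPEC =====
def Spec_toutesLesRepartitions (n : Int) (out : List (List Int)) : Prop := out = toutesLesRepartitions_alt n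
instance (n : Int) (out : List (List Int)) : Decidable (Spec_toutesLesRepartitions n out) := by unfold Spec_toutesLesRepartitions; infer_instance

-- ===== CLAIM (what is proved, stated in full; the proofs are below) =====
def Claim_equal_toutesLesRepartitions : Prop := ∀ (n : Int), Dom_toutesLesRepartitions n → Spec_toutesLesRepartitions n (toutesLesRepartitions n)

-- ===== LEMMAS AND PROOFS =====

-- a foldl that appends a constant element builds a replicate
theorem foldl_append_const (l : List Int) (x : Int) (acc : List Int) :
    l.foldl (fun p _ => p ++ [x]) acc = acc ++ List.replicate l.length x := by
  induction l generalizing acc with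
  | nil => simp
  | cons a t ih => simp [List.foldl, ih, List.replicate_succ]

theorem foldl_pyRange_append_const (k : Int) (x : Int) (acc : List Int) :
    (PySem.List.pyRange 0 k 1).foldl (fun p _ => p ++ [x]) acc = acc ++ List.replicate k.toNat x := by
  rw [foldl_append_const, PySem.List.length_pyRange_one]
  simp

-- the partition with nb2 twos (and the matching count of threes)
def part (n nb2 : Int) : List Int :=
  List.replicate ((n - 2*nb2) / 3).toNat 3 ++ List.replicate nb2.toNat 2

-- A's inner loop appends at most one partition: exactly when 3 divides n - 2*nb2
-- and the remaining scan range still contains the hit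
theorem innerA_char (n nb2 : Int) (nb3 : Int) (acc : List (List Int)) :
    innerA n nb2 nb3 acc =
      if 3 ∣ (n - 2*nb2) ∧ 3*nb3 ≤ n - 2*nb2 then acc ++ [part n nb2] else acc := by
  induction nb3, acc using innerA.induct n nb2 with
  | case1 nb3 acc h ih =>
    rw [innerA]
    simp only [dif_pos h]
    simp only [dite_eq_ite] at ih
    rw [ih]
    by_cases hh : 2*nb2 + 3*nb3 = n
    · rw [if_pos hh, if_neg (by rintro ⟨-, hl⟩; omega),
          if_pos ⟨⟨nb3, by omega⟩, by omega⟩]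
      rw [foldl_pyRange_append_const, foldl_pyRange_append_const]
      have hnb : nb3.toNat = ((n - 2*nb2)/3).toNat := by omega
      simp only [part, List.nil_append, hnb]
    · rw [if_neg hh]
      have hiff : (3 ∣ (n - 2*nb2) ∧ 3*(nb3+1) ≤ n - 2*nb2) ↔
          (3 ∣ (n - 2*nb2) ∧ 3*nb3 ≤ n - 2*nb2) := by
        constructor
        · rintro ⟨hd, hl⟩; exact ⟨hd, by omega⟩
        · rintro ⟨⟨c, hc⟩, hl⟩; exact ⟨⟨c, hc⟩, by omega⟩
      rw [if_congr hiff rfl rfl]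
  | case2 nb3 acc h =>
    rw [innerA]
    simp only [dif_neg h]
    rw [if_neg (by rintro ⟨-, hl⟩; omega)]

-- B's loop body appends the same partition as A's inner scan, whenever n - 2*nb2 ≥ 2
theorem outer_eq_loopB (n nb2 : Int) (acc : List (List Int)) :
    2*nb2 + 2 ≤ n → outerA n nb2 acc = loopB n nb2 acc := by
  induction nb2, acc using outerA.induct n with
  | case1 nb2 acc h ih =>
    intro hle
    rw [outerA, loopB]
    simp only [dif_pos h]
    have hmod : PySem.Int.mod (n - 2*nb2) 3 = 0 ↔ (3 : Int) ∣ (n - 2*nb2) :=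
      PySem.Int.mod_eq_zero_iff_dvd _ _
    by_cases hd : (3 : Int) ∣ (n - 2*nb2)
    · have h3 : 3*1 ≤ n - 2*nb2 := by rcases hd with ⟨c, hc⟩; omega
      rw [innerA_char, if_pos ⟨hd, h3⟩] at ih ⊢
      rw [if_pos (hmod.mpr hd)]
      have harg : PySem.List.pyRepeat [3] (PySem.Int.floordiv (n - 2*nb2) 3) ++
          PySem.List.pyRepeat [2] nb2 = part n nb2 := by
        rw [PySem.List.pyRepeat_singleton, PySem.List.pyRepeat_singleton,
            PySem.Int.floordiv_eq_ediv_of_pos (by omega : (0:Int) < 3)]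
        rfl
      rw [harg]
      exact ih (by omega)
    · rw [innerA_char, if_neg (by rintro ⟨hd', -⟩; exact hd hd')] at ih ⊢
      rw [if_neg (fun hc => hd (hmod.mp hc))]
      exact ih (by omega)
  | case2 nb2 acc h =>
    intro _
    rw [outerA, loopB]
    simp only [dif_neg h]

theorem main_eq (n : Int) : toutesLesRepartitions n = toutesLesRepartitions_alt n := by
  unfold toutesLesRepartitions toutesLesRepartitions_alt
  have hfd : PySem.Int.floordiv n 2 * 2 + PySem.Int.mod n 2 = n :=
    PySem.Int.floordiv_mul_add_mod n 2
  have hm0 : 0 ≤ PySem.Int.mod n 2 := PySem.Int.mod_nonneg n (by omega)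
  have hre : n - 2 * PySem.Int.floordiv n 2 = PySem.Int.mod n 2 := by omega
  simp only [hre]
  have hinit : (if PySem.Int.mod n 2 = 0 then
        [] ++ [((PySem.List.pyRange 0 (PySem.Int.floordiv n 2) 1).foldl (fun p _ => p ++ [2]) [])]
      else ([] : List (List Int))) =
      (if PySem.Int.mod n 2 = 0 then
        [] ++ [PySem.List.pyRepeat [2] (PySem.Int.floordiv n 2)]
      else []) := by
    by_cases hz : PySem.Int.mod n 2 = 0
    · simp only [if_pos hz]
      rw [foldl_pyRange_append_const, PySem.List.pyRepeat_singleton]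
      simp
    · simp only [if_neg hz]
  rw [hinit]
  exact outer_eq_loopB n (PySem.Int.floordiv n 2 - 1) _ (by omega)

-- ===== VERDICT (by name: the statement is the Claim_ definition above) =====
theorem toutesLesRepartitions_spec : Claim_equal_toutesLesRepartitions := by
  intro n _
  exact main_eq n
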